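-- pv_equiv track=rewrite | github.com/bleed1000/bsuir | 3lab/transformation.py | transform_sdnf
-- ===== SOURCE A (Python) =====
-- def transform_sdnf(sdnf: str):
--     result = []
--     temp = sdnf.replace("|", " ")
--     ans = temp.split()
--     for row in ans:
--         temp_res = []
--         skip_next = False
--         for c in row:
--             if skip_next:
--                 skip_next = False
--                 continue
--             if c == "(" or c == ")":
--                 continue
--             elif c == "!":
--                 temp_res.append("0")
--                 skip_next = True
--             else:
--                 temp_res.append("1")
--         result.append(temp_res)
--     return result
-- ===== SOURCE B (Python) =====
-- def transform_sdnf(sdnf: str):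
--     # Run-length reformulation: instead of a per-character skip flag, each
--     # maximal run of k consecutive '!' contributes ceil(k/2) zeros and, when k
--     # is odd, consumes the character right after the run; remaining characters
--     # are parens (dropped) or variables (ones).
--     result = []
--     for row in sdnf.replace("|", " ").split():
--         out = []
--         i, n = 0, len(row)
--         while i < n:
--             c = row[i]
--             if c == "!":
--                 j = i
--                 while j < n and row[j] == "!":
--                     j += 1
--                 k = j - i
--                 out.extend(["0"] * ((k + 1) // 2))
--                 i = j + k % 2  # an odd run consumes the next character
--             else:
--                 if c != "(" and c != ")":
--                     out.append("1")
--                 i += 1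
--         result.append(out)
--     return result
-- ===== Notes on version B (the rewrite author's own statement) =====
-- stated objective: alternative
-- what changed: Replaces the per-character skip_next state machine with a run-length formulation: each maximal run of k consecutive '!' is measured at once and emits ceil(k/2) zeros, consuming the following character exactly when k is odd; the remaining characters are classified statelessly.
import Mathlib
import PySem

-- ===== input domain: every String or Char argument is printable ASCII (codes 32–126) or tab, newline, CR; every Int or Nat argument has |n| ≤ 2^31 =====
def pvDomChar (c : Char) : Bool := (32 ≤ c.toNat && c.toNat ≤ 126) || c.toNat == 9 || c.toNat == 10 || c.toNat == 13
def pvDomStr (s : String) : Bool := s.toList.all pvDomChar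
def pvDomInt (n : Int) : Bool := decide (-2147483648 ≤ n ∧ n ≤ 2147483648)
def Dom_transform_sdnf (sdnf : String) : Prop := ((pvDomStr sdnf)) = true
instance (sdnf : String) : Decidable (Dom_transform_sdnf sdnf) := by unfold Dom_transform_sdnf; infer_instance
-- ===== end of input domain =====

-- B replaces A's per-character skip_next state machine by a run-length scan: each maximal
-- run of k '!' emits ceil(k/2) zeros and, when k is odd, consumes the next character;
-- objective: alternative formulation, same behaviour.


-- ===== PORT A =====
def transform_sdnf (sdnf : String) : List (List String) :=
  let temp := PySem.Str.replace sdnf "|" " "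
  let ans := PySem.Str.split₀ temp
  ans.foldl (fun result row =>
    let inner := row.toList.foldl (fun (st : List String × Bool) c =>
      if st.2 then (st.1, false)
      else if c = '(' ∨ c = ')' then st
      else if c = '!' then (st.1 ++ ["0"], true)
      else (st.1 ++ ["1"], false)) ([], false)
    result ++ [inner.1]) []

-- ===== PORT B =====
-- length of the leading run of '!' (Source B's inner `while row[j] == "!": j += 1`)
def pvCountBang : List Char → Nat
  | [] => 0
  | c :: r => if c = '!' then pvCountBang r + 1 else 0

-- Source B's outer while loop over one row, as structural recursion on the remaining chars:
-- a '!' starts a maximal run of length k (here k = pvCountBang rest + 1), which emits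
-- (k+1)/2 zeros and advances past the run plus (k % 2) extra characters.
def pvRowB : List Char → List String
  | [] => []
  | c :: rest =>
      if c = '!' then
        let k := pvCountBang rest + 1
        List.replicate ((k + 1) / 2) "0" ++ pvRowB (rest.drop (k - 1 + k % 2))
      else if c = '(' ∨ c = ')' then pvRowB rest
      else "1" :: pvRowB rest
  termination_by l => l.length
  decreasing_by
    · simp only [List.length_cons, List.length_drop]; omega
    · simp
    · simp

def transform_sdnf_alt (sdnf : String) : List (List String) :=
  (PySem.Str.split₀ (PySem.Str.replace sdnf "|" " ")).map (fun row => pvRowB row.toList)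

-- ===== PRECONDITION & SPEC =====
def Spec_transform_sdnf (sdnf : String) (out : List (List String)) : Prop := out = transform_sdnf_alt sdnf
instance (sdnf : String) (out : List (List String)) : Decidable (Spec_transform_sdnf sdnf out) := by unfold Spec_transform_sdnf; infer_instance

-- ===== CLAIM =====
def Claim_equal_transform_sdnf : Prop := ∀ (sdnf : String), Dom_transform_sdnf sdnf → Spec_transform_sdnf sdnf (transform_sdnf sdnf)

-- ===== LEMMAS AND PROOFS =====
def pvStepA (st : List String × Bool) (c : Char) : List String × Bool :=
  if st.2 then (st.1, false)
  else if c = '(' ∨ c = ')' then st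
  else if c = '!' then (st.1 ++ ["0"], true)
  else (st.1 ++ ["1"], false)

theorem pvTakeBang (l : List Char) : l.take (pvCountBang l) = List.replicate (pvCountBang l) '!' := by
  induction l with
  | nil => simp [pvCountBang]
  | cons c r ih =>
      by_cases h : c = '!'
      · simp [pvCountBang, h, List.replicate_succ, ih]
      · simp [pvCountBang, h]

theorem pvBangFold (k : Nat) : ∀ (acc : List String) (tail : List Char),
    ((List.replicate k '!' ++ tail).foldl pvStepA (acc, false)).1
      = ((tail.drop (k % 2)).foldl pvStepA (acc ++ List.replicate ((k + 1) / 2) "0", false)).1 := by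
  induction k using Nat.strong_induction_on with
  | _ k ih =>
    match k with
    | 0 => intro acc tail; simp
    | 1 =>
        intro acc tail
        have h1 : pvStepA (acc, false) '!' = (acc ++ ["0"], true) := by simp [pvStepA]
        cases tail with
        | nil => simp [h1]
        | cons d ds =>
            have h2 : pvStepA (acc ++ ["0"], true) d = (acc ++ ["0"], false) := by simp [pvStepA]
            simp [h1, h2]
    | (k + 2) =>
        intro acc tail
        have h1 : pvStepA (acc, false) '!' = (acc ++ ["0"], true) := by simp [pvStepA]
        have h2 : pvStepA (acc ++ ["0"], true) '!' = (acc ++ ["0"], false) := by simp [pvStepA]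
        have hrep : List.replicate (k + 2) '!' ++ tail
            = '!' :: '!' :: (List.replicate k '!' ++ tail) := by
          simp [List.replicate_succ]
        rw [hrep]
        simp only [List.foldl_cons, h1, h2]
        rw [ih k (by omega) (acc ++ ["0"]) tail]
        have hm : (k + 2) % 2 = k % 2 := by omega
        have hd : (k + 2 + 1) / 2 = (k + 1) / 2 + 1 := by omega
        rw [hm, hd]
        have : acc ++ ["0"] ++ List.replicate ((k + 1) / 2) "0"
            = acc ++ List.replicate ((k + 1) / 2 + 1) "0" := by
          simp [List.replicate_succ, List.append_assoc]
        rw [this]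

theorem pvRow_eq : ∀ (n : Nat) (l : List Char), l.length ≤ n → ∀ (acc : List String),
    (l.foldl pvStepA (acc, false)).1 = acc ++ pvRowB l := by
  intro n
  induction n with
  | zero =>
      intro l hl acc
      have : l = [] := List.eq_nil_of_length_eq_zero (Nat.le_zero.mp hl)
      subst this; simp [pvRowB]
  | succ n ih =>
      intro l hl acc
      cases l with
      | nil => simp [pvRowB]
      | cons c rest =>
          by_cases hb : c = '!'
          · subst hb
            set k := pvCountBang rest + 1 with hk
            have hcount : pvCountBang ('!' :: rest) = k := by simp [pvCountBang, hk]
            have hdecomp : ('!' :: rest) = List.replicate k '!' ++ ('!' :: rest).drop k := by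
              conv_lhs => rw [← List.take_append_drop k ('!' :: rest)]
              rw [← hcount, pvTakeBang, hcount]
            have hdrop : (('!' :: rest).drop k).drop (k % 2) = rest.drop (k - 1 + k % 2) := by
              rw [List.drop_drop]
              have h2 : k + k % 2 = (k - 1 + k % 2) + 1 := by omega
              rw [h2]
              simp
            have hfold := pvBangFold k acc (('!' :: rest).drop k)
            rw [← hdecomp, hdrop] at hfold
            rw [hfold]
            have hlen : (rest.drop (k - 1 + k % 2)).length ≤ n := by
              have h3 := List.length_drop (l := rest) (i := k - 1 + k % 2)
              have hr : rest.length ≤ n := by simpa using Nat.succ_le_succ_iff.mp hl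
              omega
            rw [ih _ hlen]
            rw [show pvRowB ('!' :: rest)
                = List.replicate ((pvCountBang rest + 1 + 1) / 2) "0"
                  ++ pvRowB (rest.drop (pvCountBang rest + 1 - 1 + (pvCountBang rest + 1) % 2))
              from by simp [pvRowB]]
            simp [hk, List.append_assoc]
          · have hr : rest.length ≤ n := by simpa using Nat.succ_le_succ_iff.mp hl
            by_cases hp : c = '(' ∨ c = ')'
            · have h1 : pvStepA (acc, false) c = (acc, false) := by simp [pvStepA, hp]
              simp only [List.foldl_cons, h1]
              rw [ih _ hr]
              rw [pvRowB]
              simp [hb, hp]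
            · have h1 : pvStepA (acc, false) c = (acc ++ ["1"], false) := by
                simp [pvStepA, hb, hp]
              simp only [List.foldl_cons, h1]
              rw [ih _ hr]
              rw [pvRowB]
              simp [hb, hp, List.append_assoc]

-- ===== VERDICT =====
theorem transform_sdnf_spec : Claim_equal_transform_sdnf := by
  intro sdnf _
  unfold Spec_transform_sdnf transform_sdnf transform_sdnf_alt
  rw [PySem.List.foldl_append_singleton_eq_map]
  refine List.map_congr_left ?_
  intro row _
  exact pvRow_eq row.toList.length row.toList (le_refl _) []
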